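-- pv_equiv track=rewrite | github.com/MrArvon/Fashion-Campus | api/utils.py | is_num
-- ===== SOURCE A (Python) =====
-- import string
--
-- def is_num(value: str) -> bool:
--
--     dots: int
--     dots = 0
--
--     if len(value) > 0:
--
--         for c in value:
--
--             if c == ".":
--
--                 if dots > 1:
--
--                     return False
--
--                 dots += 1
--                 continue
--
--             if c not in string.digits:
--
--                 return False
--
--         return True
--
--     return False
-- ===== SOURCE B (Python) =====
-- def is_num(value: str) -> bool:
--     parts = value.split(".")
--     return value != "" and len(parts) <= 3 and all(p.isdigit() or p == "" for p in parts)
-- ===== Notes on version B (the rewrite author's own statement) =====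
-- stated objective: simpler
-- what changed: A's stateful character loop with a running dot counter and early returns is replaced by tokenization: split the string on the dot separator, require at most 3 parts and that every part is empty or all digits.
import Mathlib
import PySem

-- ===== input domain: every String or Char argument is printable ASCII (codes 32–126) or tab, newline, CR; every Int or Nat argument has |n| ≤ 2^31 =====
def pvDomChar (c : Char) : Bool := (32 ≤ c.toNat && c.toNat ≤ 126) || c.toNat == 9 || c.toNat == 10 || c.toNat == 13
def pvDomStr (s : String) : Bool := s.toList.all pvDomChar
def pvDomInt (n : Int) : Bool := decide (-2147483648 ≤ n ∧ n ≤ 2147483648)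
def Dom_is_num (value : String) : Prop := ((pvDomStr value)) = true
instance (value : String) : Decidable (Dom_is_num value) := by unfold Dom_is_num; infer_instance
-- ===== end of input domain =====

-- B tokenizes the string by splitting on the dot separator (at most 3 parts, every part empty or all digits)
-- instead of A's stateful character loop with a running dot counter (objective: simpler).
-- On the ASCII domain str.isdigit coincides with membership in string.digits.

-- ===== PORT A =====
-- string.digits, the module-level constant A tests membership in
def pyDigits : List Char := ['0','1','2','3','4','5','6','7','8','9']
def isDigitChar (c : Char) : Bool := pyDigits.contains c

-- the loop body of A: running dot counter, early False on a third dot or a non-digit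
def isNumLoop : List Char → Int → Bool
  | [], _ => true
  | c :: rest, dots =>
    if c = '.' then
      if dots > 1 then false
      else isNumLoop rest (dots + 1)
    else if !(isDigitChar c) then false
    else isNumLoop rest dots

def is_num (value : String) : Bool :=
  if PySem.Str.len value > 0 then isNumLoop value.toList 0 else false

-- ===== PORT B =====
def is_num_alt (value : String) : Bool :=
  let parts := PySem.Chars.splitOn value.toList ['.']     -- value.split(".")
  decide (value ≠ "") && decide (parts.length ≤ 3) &&
    parts.all (fun p => PySem.Chars.strIsdigit p || decide (p = []))

-- ===== PRECONDITION & SPEC =====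
def Spec_is_num (value : String) (out : Bool) : Prop := out = is_num_alt value
instance (value : String) (out : Bool) : Decidable (Spec_is_num value out) := by unfold Spec_is_num; infer_instance

-- ===== CLAIM =====
def Claim_equal_is_num : Prop := ∀ (value : String), Dom_is_num value → Spec_is_num value (is_num value)

-- ===== LEMMAS AND PROOFS =====

-- A's digit test is str.isdigit's per-character test
lemma isDigitChar_eq (c : Char) : isDigitChar c = PySem.Chars.isdigit c := by
  simp only [isDigitChar, pyDigits, PySem.Chars.isdigit]
  rw [Bool.eq_iff_iff]
  simp only [List.contains_eq_mem, List.mem_cons, List.not_mem_nil, or_false,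
    decide_eq_true_eq, Bool.and_eq_true, Char.le_def, UInt32.le_iff_toNat_le, Char.ext_iff,
    ← UInt32.toNat_inj]
  have hv : ∀ d : Char, d.val.toNat = d.toNat := fun d => rfl
  simp only [hv, show ('0':Char).toNat = 48 from rfl, show ('1':Char).toNat = 49 from rfl, show ('2':Char).toNat = 50 from rfl, show ('3':Char).toNat = 51 from rfl, show ('4':Char).toNat = 52 from rfl, show ('5':Char).toNat = 53 from rfl, show ('6':Char).toNat = 54 from rfl, show ('7':Char).toNat = 55 from rfl, show ('8':Char).toNat = 56 from rfl, show ('9':Char).toNat = 57 from rfl]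
  omega

-- reference form of splitting on '.' (proof helper, structural recursion)
def splitDots : List Char → List Char → List (List Char)
  | [], cur => [cur.reverse]
  | c :: rest, cur => if c = '.' then cur.reverse :: splitDots rest [] else splitDots rest (c :: cur)

lemma go_eq (fuel : Nat) (l cur : List Char) (acc : List (List Char)) (h : l.length < fuel) :
    PySem.Chars.splitOn.go ['.'] fuel l cur acc = acc.reverse ++ splitDots l cur := by
  induction fuel generalizing l cur acc with
  | zero => omega
  | succ f ih =>
    cases l with
    | nil => simp [PySem.Chars.splitOn.go, splitDots]
    | cons c rest =>
      simp only [PySem.Chars.splitOn.go, List.isPrefixOf, splitDots]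
      by_cases hc : c = '.'
      · subst hc
        simp only [beq_self_eq_true, Bool.and_self, if_pos,
          List.length_singleton, List.drop_succ_cons, List.drop_zero]
        rw [ih rest [] (cur.reverse :: acc) (by simp at h ⊢; omega)]
        simp
      · have hne : ('.' == c) = false := by
          simp only [beq_eq_false_iff_ne, Ne]
          exact fun hh => hc hh.symm
        simp only [hne, Bool.false_and, Bool.false_eq_true, if_false, if_neg hc]
        exact ih rest (c :: cur) acc (by simp at h ⊢; omega)

lemma splitOn_eq_splitDots (l : List Char) :
    PySem.Chars.splitOn l ['.'] = splitDots l [] := by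
  unfold PySem.Chars.splitOn
  rw [go_eq (l.length + 1) l [] [] (by omega)]
  simp

lemma length_splitDots (l cur : List Char) :
    (splitDots l cur).length = l.countP (fun c => c = '.') + 1 := by
  induction l generalizing cur with
  | nil => simp [splitDots]
  | cons c rest ih =>
    simp only [splitDots, List.countP_cons]
    by_cases hc : c = '.' <;> simp [hc, ih]

-- every part is "empty or all digits" iff every non-dot character is a digit
lemma part_pred (p : List Char) :
    (PySem.Chars.strIsdigit p || decide (p = [])) = p.all PySem.Chars.isdigit := by
  cases p <;> simp [PySem.Chars.strIsdigit]

lemma all_splitDots (l cur : List Char) :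
    (splitDots l cur).all (fun p => p.all PySem.Chars.isdigit)
      = (cur.all PySem.Chars.isdigit && (l.filter (fun c => c ≠ '.')).all PySem.Chars.isdigit) := by
  induction l generalizing cur with
  | nil => simp [splitDots]
  | cons c rest ih =>
    simp only [splitDots, List.filter_cons]
    by_cases hc : c = '.'
    · simp [hc, ih]
    · have hcd : (decide (c ≠ '.')) = true := by simp [hc]
      simp only [if_neg hc, hcd, if_true, ih (c :: cur), List.all_cons]
      cases PySem.Chars.isdigit c <;> cases cur.all PySem.Chars.isdigit <;> simp

-- characterisation of A's loop for any running count d with d ≤ 2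
lemma isNumLoop_eq (cs : List Char) (d : Int) (hd : d ≤ 2) :
    isNumLoop cs d
      = (decide (d + (cs.countP (fun c => c = '.') : Int) ≤ 2) &&
         (cs.filter (fun c => c ≠ '.')).all isDigitChar) := by
  induction cs generalizing d with
  | nil => simp [isNumLoop, hd]
  | cons c rest ih =>
    by_cases h : c = '.'
    · subst h
      by_cases h2 : d > 1
      · have hnn : (0:Int) ≤ (rest.countP (fun c => c = '.') : Int) := Int.natCast_nonneg _
        simp only [isNumLoop, if_pos h2, List.countP_cons, List.filter_cons]
        simp only [decide_true, if_pos, decide_eq_true_eq]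
        have : decide (d + ((rest.countP (fun c => c = '.') + 1 : Nat) : Int) ≤ 2) = false := by
          apply decide_eq_false; push_cast; omega
        rw [this]; simp
      · have h1 : d + 1 ≤ 2 := by omega
        simp only [isNumLoop, if_neg h2, ih (d + 1) h1, List.countP_cons,
          List.filter_cons]
        simp only [decide_true, if_pos, decide_eq_true_eq]
        have : d + 1 + (rest.countP (fun c => c = '.') : Int)
             = d + ((rest.countP (fun c => c = '.') + 1 : Nat) : Int) := by push_cast; ring
        rw [this]; simp
    · by_cases hdig : isDigitChar c
      · simp [isNumLoop, h, hdig, ih d hd]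
      · simp only [isNumLoop, if_neg h, List.filter_cons]
        simp [h, hdig]

-- ===== VERDICT =====
theorem is_num_spec : Claim_equal_is_num := by
  intro value _
  simp only [Spec_is_num, is_num, is_num_alt, splitOn_eq_splitDots]
  have hall : (splitDots value.toList []).all (fun p => PySem.Chars.strIsdigit p || decide (p = []))
      = (value.toList.filter (fun c => c ≠ '.')).all PySem.Chars.isdigit := by
    rw [show (fun p => PySem.Chars.strIsdigit p || decide (p = []))
          = (fun p : List Char => p.all PySem.Chars.isdigit) from funext part_pred,
        all_splitDots]
    simp
  have hdig : isDigitChar = PySem.Chars.isdigit := funext isDigitChar_eq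
  rw [hall, length_splitDots]
  by_cases hlen : PySem.Str.len value > 0
  · rw [if_pos hlen, isNumLoop_eq value.toList 0 (by omega), hdig]
    have h' : value ≠ "" := by
      intro h; subst h; simp [PySem.Str.len, PySem.Chars.len] at hlen
    have hcnt : decide ((0:Int) + (value.toList.countP (fun c => c = '.') : Int) ≤ 2)
        = decide (value.toList.countP (fun c => c = '.') + 1 ≤ 3) := by
      rw [decide_eq_decide]; push_cast; omega
    rw [hcnt]
    simp [h', Bool.and_comm, Bool.and_assoc, Bool.and_left_comm]
  · rw [if_neg hlen]
    have h' : value = "" := by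
      simp only [PySem.Str.len, PySem.Chars.len, not_lt] at hlen
      have h0 : value.toList = [] := by
        have : value.toList.length = 0 := by omega
        simpa using this
      exact String.toList_inj.mp (by simp [h0])
    simp [h']
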